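-- pv_equiv track=rewrite | github.com/haruki-tanaka-tech/flowcoin | test/functional/test_framework/util.py | get_model_dims_for_height
-- ===== SOURCE A (Python) =====
-- GROWTH_SCHEDULE = [
--     # (height_start, height_end, d_model, n_layers, d_ff, n_heads)
--     (0, 99, 512, 8, 1024, 8),
--     (100, 199, 640, 12, 1280, 10),
--     (200, 299, 768, 16, 1536, 12),
--     (300, 399, 896, 20, 1792, 14),
--     (400, 499, 1024, 24, 2048, 16),
-- ]
--
-- def get_model_dims_for_height(height: int) -> dict:
--     """Get the expected model dimensions for a given block height.
--
--     Implements the growth schedule from consensus/growth.h.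
--
--     Returns:
--         Dict with keys: d_model, n_layers, d_ff, n_heads.
--     """
--     for start, end, d_model, n_layers, d_ff, n_heads in GROWTH_SCHEDULE:
--         if start <= height <= end:
--             return {
--                 "d_model": d_model,
--                 "n_layers": n_layers,
--                 "d_ff": d_ff,
--                 "n_heads": n_heads,
--             }
--
--     # Phase 2: frozen at maximum dimensions
--     return {
--         "d_model": 1024,
--         "n_layers": 24,
--         "d_ff": 2048,
--         "n_heads": 16,
--     }
-- ===== SOURCE B (Python) =====
-- GROWTH_SCHEDULE = [
--     (0, 99, 512, 8, 1024, 8),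
--     (100, 199, 640, 12, 1280, 10),
--     (200, 299, 768, 16, 1536, 12),
--     (300, 399, 896, 20, 1792, 14),
--     (400, 499, 1024, 24, 2048, 16),
-- ]
--
-- def get_model_dims_for_height(height: int) -> dict:
--     """O(1) bucket lookup: each schedule row covers a 100-height bucket."""
--     idx = height // 100
--     if 0 <= idx <= 4:
--         _, _, d_model, n_layers, d_ff, n_heads = GROWTH_SCHEDULE[idx]
--     else:
--         d_model, n_layers, d_ff, n_heads = 1024, 24, 2048, 16
--     return {
--         "d_model": d_model,
--         "n_layers": n_layers,
--         "d_ff": d_ff,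
--         "n_heads": n_heads,
--     }
-- ===== Notes on version B (the rewrite author's own statement) =====
-- stated objective: idiomatic
-- what changed: Replaces the linear scan over GROWTH_SCHEDULE ranges with direct O(1) bucket indexing via height // 100, falling to the frozen-max default outside indices 0..4.
import Mathlib
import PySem

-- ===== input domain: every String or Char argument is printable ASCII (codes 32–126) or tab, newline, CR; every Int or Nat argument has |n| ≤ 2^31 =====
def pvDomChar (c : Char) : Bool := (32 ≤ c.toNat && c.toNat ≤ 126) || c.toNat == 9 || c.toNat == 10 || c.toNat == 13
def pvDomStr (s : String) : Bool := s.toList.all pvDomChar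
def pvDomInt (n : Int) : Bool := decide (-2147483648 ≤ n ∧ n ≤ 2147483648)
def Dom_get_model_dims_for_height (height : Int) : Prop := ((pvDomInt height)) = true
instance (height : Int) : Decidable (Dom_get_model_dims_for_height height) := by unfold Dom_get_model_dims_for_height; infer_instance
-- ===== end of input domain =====

-- B replaces A's linear scan over the schedule rows by O(1) bucket indexing (height // 100); equal return value for every int height.

-- ===== PORT A =====
def pvSchedule : List (Int × Int × Int × Int × Int × Int) :=
  [(0, 99, 512, 8, 1024, 8),
   (100, 199, 640, 12, 1280, 10),
   (200, 299, 768, 16, 1536, 12),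
   (300, 399, 896, 20, 1792, 14),
   (400, 499, 1024, 24, 2048, 16)]

-- the for-loop with early return, as structural recursion over the schedule
def pvScan (height : Int) : List (Int × Int × Int × Int × Int × Int) → List (String × Int)
  | [] => [("d_model", 1024), ("n_layers", 24), ("d_ff", 2048), ("n_heads", 16)]
  | (start, end_, d_model, n_layers, d_ff, n_heads) :: rest =>
      if start ≤ height ∧ height ≤ end_ then
        [("d_model", d_model), ("n_layers", n_layers), ("d_ff", d_ff), ("n_heads", n_heads)]
      else pvScan height rest

def get_model_dims_for_height (height : Int) : List (String × Int) :=
  pvScan height pvSchedule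

-- ===== PORT B =====
def get_model_dims_for_height_alt (height : Int) : List (String × Int) :=
  let idx := PySem.Int.floordiv height 100
  let t :=
    if 0 ≤ idx ∧ idx ≤ 4 then
      (PySem.List.pyGet? pvSchedule idx).getD (0, 0, 0, 0, 0, 0)  -- index is in range, default unreachable
    else (0, 0, 1024, 24, 2048, 16)
  [("d_model", t.2.2.1), ("n_layers", t.2.2.2.1), ("d_ff", t.2.2.2.2.1), ("n_heads", t.2.2.2.2.2)]

-- ===== PRECONDITION & SPEC =====
def Spec_get_model_dims_for_height (height : Int) (out : List (String × Int)) : Prop := out = get_model_dims_for_height_alt height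
instance (height : Int) (out : List (String × Int)) : Decidable (Spec_get_model_dims_for_height height out) := by unfold Spec_get_model_dims_for_height; infer_instance

-- ===== CLAIM (what is proved, stated in full; the proofs are below) =====
def Claim_equal_get_model_dims_for_height : Prop := ∀ (height : Int), Dom_get_model_dims_for_height height → Spec_get_model_dims_for_height height (get_model_dims_for_height height)

-- ===== LEMMAS AND PROOFS =====

-- ===== VERDICT (by name: the statement is the Claim_ definition above) =====
theorem get_model_dims_for_height_spec : Claim_equal_get_model_dims_for_height := by
  intro h _
  unfold Spec_get_model_dims_for_height get_model_dims_for_height get_model_dims_for_height_alt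
    pvScan pvSchedule
  rw [PySem.Int.floordiv_eq_ediv_of_pos (by norm_num)]
  by_cases h0 : 0 ≤ h ∧ h ≤ 99
  · have e : h / 100 = 0 := by omega
    simp [pvScan, e, PySem.List.pyGet?, PySem.List.pyIdx?, h0]
  · by_cases h1 : 100 ≤ h ∧ h ≤ 199
    · have e : h / 100 = 1 := by omega
      simp [pvScan, e, PySem.List.pyGet?, PySem.List.pyIdx?, h0, h1]
    · by_cases h2 : 200 ≤ h ∧ h ≤ 299
      · have e : h / 100 = 2 := by omega
        simp [pvScan, e, PySem.List.pyGet?, PySem.List.pyIdx?, h0, h1, h2]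
      · by_cases h3 : 300 ≤ h ∧ h ≤ 399
        · have e : h / 100 = 3 := by omega
          simp [pvScan, e, PySem.List.pyGet?, PySem.List.pyIdx?, h0, h1, h2, h3]
        · by_cases h4 : 400 ≤ h ∧ h ≤ 499
          · have e : h / 100 = 4 := by omega
            simp [pvScan, e, PySem.List.pyGet?, PySem.List.pyIdx?, h0, h1, h2, h3, h4]
          · have e : ¬ (0 ≤ h / 100 ∧ h / 100 ≤ 4) := by omega
            simp [pvScan, e, h0, h1, h2, h3, h4]
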